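-- pv_equiv track=rewrite | github.com/Tinkybala/sudoku-solver | solver.py | _get_inequality_constraints
-- ===== SOURCE A (Python) =====
-- import math
-- from typing import List, Tuple, DefaultDict, Deque
--
-- def _get_inequality_constraints(grid: List[List[int]]) -> List[Tuple[str, str]]:
--     """
--     Determines the inequality constraints of a n x n sudoku grid.
--
--     Args:
--         grid (List[List[int]]): n x n sudoku grid
--
--     Returns:
--         List[Tuple[int, int]]: A list of tuples, each tuples containing two cells which should
--                             not be equal. Example: [("1-1","1-2")] has only one constraint between
--                             the cells 1-1 and 1-2.
--     """
--     constraints = set([])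
--     region_size = math.isqrt(len(grid))
--     proper_sudoku = True if region_size**2 == len(grid) else False
--     for row_i in range(len(grid)):
--         for col_i in range(len(grid)):
--             cols = list(range(0,col_i)) + list(range(col_i+1, len(grid)))
--             rows = list(range(0, row_i)) + list(range(row_i+1, len(grid)))
--             for c in cols:
--                 constraints.add(tuple(sorted((f"{row_i+1}-{col_i+1}",f"{row_i+1}-{c+1}"))))
--             for r in rows:
--                 constraints.add(tuple(sorted((f"{row_i+1}-{col_i+1}",f"{r+1}-{col_i+1}"))))
--             if proper_sudoku:
--                 top_left_row = (row_i)//region_size * region_size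
--                 top_left_col = (col_i)//region_size * region_size
--                 for i in range(region_size):
--                     for j in range(region_size):
--                         if top_left_row + i != row_i or top_left_col + j != col_i:
--                             constraints.add(tuple(sorted((f"{row_i+1}-{col_i+1}", f"{top_left_row + i + 1}-{top_left_col + j + 1}"))))
--
--     constraints = sorted(list(constraints))
--
--     return constraints
-- ===== SOURCE B (Python) =====
-- import math
-- from typing import List, Tuple
--
--
-- def _get_inequality_constraints(grid: List[List[int]]) -> List[Tuple[str, str]]:
--     # Group-first decomposition: enumerate each constraint group (row, column,
--     # region) once and add all unordered pairs within the group.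
--     n = len(grid)
--     region_size = math.isqrt(n)
--     constraints = set()
--
--     def cell(r, c):
--         return f"{r+1}-{c+1}"
--
--     def add_group(cells):
--         for a in range(len(cells)):
--             for b in range(a + 1, len(cells)):
--                 constraints.add(tuple(sorted((cells[a], cells[b]))))
--
--     for r in range(n):
--         add_group([cell(r, c) for c in range(n)])
--     for c in range(n):
--         add_group([cell(r, c) for r in range(n)])
--     if region_size ** 2 == n:
--         region = region_size * region_size
--         for br in range(region_size):
--             for bc in range(region_size):
--                 add_group([cell(br * region_size + k // region_size,
--                                 bc * region_size + k % region_size)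
--                            for k in range(region)])
--     return sorted(constraints)
-- ===== Notes on version B (the rewrite author's own statement) =====
-- stated objective: alternative
-- what changed: B enumerates constraint groups (each row, each column, each region block) and adds all C(n,2) unordered pairs within a group, instead of A's per-cell scan that re-adds every neighbour pair from both endpoints; the set deduplication and final sort are unchanged.
import Mathlib
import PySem

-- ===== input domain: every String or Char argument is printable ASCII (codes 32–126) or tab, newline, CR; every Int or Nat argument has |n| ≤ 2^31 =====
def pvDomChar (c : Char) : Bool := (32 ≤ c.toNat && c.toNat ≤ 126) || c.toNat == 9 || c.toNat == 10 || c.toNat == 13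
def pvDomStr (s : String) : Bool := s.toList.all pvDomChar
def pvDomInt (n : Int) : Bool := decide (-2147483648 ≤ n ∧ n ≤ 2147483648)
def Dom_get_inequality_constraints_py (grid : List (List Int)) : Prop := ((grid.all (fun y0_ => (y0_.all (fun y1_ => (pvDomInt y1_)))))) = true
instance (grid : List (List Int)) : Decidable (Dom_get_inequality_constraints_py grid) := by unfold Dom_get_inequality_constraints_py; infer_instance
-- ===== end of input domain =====

-- B replaces A's per-cell neighbour enumeration by a group-first decomposition (all pairs
-- within each row / column / region group); same exact return value, objective: alternative.

-- Helpers shared by both ports (both Pythons build the same f-string and tuple(sorted(...))):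
-- math.isqrt(n); exact for n ≥ 0 (the only use is n = len(grid))
def pvIsqrt (n : Int) : Int := (Nat.sqrt n.toNat : Int)
-- f"{r+1}-{c+1}"
def pvCell (r c : Int) : String := PySem.Int.toStr (r + 1) ++ "-" ++ PySem.Int.toStr (c + 1)
-- tuple(sorted((a, b)))
def pvSortPair (a b : String) : String × String :=
  match PySem.List.sorted [a, b] (fun s => s) false with
  | [x, y] => (x, y)
  | _ => (a, b)  -- unreachable: sorted of a 2-list has 2 elements

-- ===== PORT A =====
-- body of A's inner 'for col_i' loop (cols/rows neighbour scans, then the region scan)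
def pvACell (n rs : Int) (proper : Bool) (row_i : Int)
    (constraints : PySem.Set (String × String)) (col_i : Int) : PySem.Set (String × String) :=
  let cols := PySem.List.pyRange 0 col_i ++ PySem.List.pyRange (col_i + 1) n
  let rows := PySem.List.pyRange 0 row_i ++ PySem.List.pyRange (row_i + 1) n
  let constraints := cols.foldl (fun s c => s.add (pvSortPair (pvCell row_i col_i) (pvCell row_i c))) constraints
  let constraints := rows.foldl (fun s r => s.add (pvSortPair (pvCell row_i col_i) (pvCell r col_i))) constraints
  if proper then
    let top_left_row := PySem.Int.floordiv row_i rs * rs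
    let top_left_col := PySem.Int.floordiv col_i rs * rs
    (PySem.List.pyRange 0 rs).foldl (fun s i =>
      (PySem.List.pyRange 0 rs).foldl (fun s j =>
        if top_left_row + i ≠ row_i ∨ top_left_col + j ≠ col_i then
          s.add (pvSortPair (pvCell row_i col_i) (pvCell (top_left_row + i) (top_left_col + j)))
        else s) s) constraints
  else constraints

-- body of A's outer 'for row_i' loop
def pvARow (n rs : Int) (proper : Bool)
    (constraints : PySem.Set (String × String)) (row_i : Int) : PySem.Set (String × String) :=
  (PySem.List.pyRange 0 n).foldl (pvACell n rs proper row_i) constraints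

def get_inequality_constraints_py (grid : List (List Int)) : List (String × String) :=
  let constraints : PySem.Set (String × String) := PySem.Set.empty
  let region_size : Int := pvIsqrt (grid.length : Int)
  let proper_sudoku : Bool := region_size ^ 2 == (grid.length : Int)
  let constraints := (PySem.List.pyRange 0 (grid.length : Int)).foldl
    (pvARow (grid.length : Int) region_size proper_sudoku) constraints
  PySem.List.sorted2 constraints Prod.fst Prod.snd false

-- ===== PORT B =====
-- add all C(len,2) unordered pairs of a constraint group's cells
def pvAddGroup (constraints : PySem.Set (String × String)) (cells : List String) :
    PySem.Set (String × String) :=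
  (PySem.List.pyRange 0 (cells.length : Int)).foldl (fun s a =>
    (PySem.List.pyRange (a + 1) (cells.length : Int)).foldl (fun s b =>
      s.add (pvSortPair (PySem.List.pyGetD cells a "") (PySem.List.pyGetD cells b ""))) s) constraints

def get_inequality_constraints_py_alt (grid : List (List Int)) : List (String × String) :=
  let n : Int := (grid.length : Int)
  let region_size : Int := pvIsqrt n
  let constraints : PySem.Set (String × String) := PySem.Set.empty
  let constraints := (PySem.List.pyRange 0 n).foldl (fun s r =>
    pvAddGroup s ((PySem.List.pyRange 0 n).map (fun c => pvCell r c))) constraints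
  let constraints := (PySem.List.pyRange 0 n).foldl (fun s c =>
    pvAddGroup s ((PySem.List.pyRange 0 n).map (fun r => pvCell r c))) constraints
  let constraints := if region_size ^ 2 == n then
      let region := region_size * region_size
      (PySem.List.pyRange 0 region_size).foldl (fun s br =>
        (PySem.List.pyRange 0 region_size).foldl (fun s bc =>
          pvAddGroup s ((PySem.List.pyRange 0 region).map (fun k =>
            pvCell (br * region_size + PySem.Int.floordiv k region_size)
                   (bc * region_size + PySem.Int.mod k region_size)))) s) constraints
    else constraints
  PySem.List.sorted2 constraints Prod.fst Prod.snd false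

-- ===== PRECONDITION & SPEC =====
def Spec_get_inequality_constraints_py (grid : List (List Int)) (out : List (String × String)) : Prop := out = get_inequality_constraints_py_alt grid
instance (grid : List (List Int)) (out : List (String × String)) : Decidable (Spec_get_inequality_constraints_py grid out) := by unfold Spec_get_inequality_constraints_py; infer_instance

-- ===== CLAIM (what is proved, stated in full; the proofs are below) =====
def Claim_equal_get_inequality_constraints_py : Prop := ∀ (grid : List (List Int)), Dom_get_inequality_constraints_py grid → Spec_get_inequality_constraints_py grid (get_inequality_constraints_py grid)

-- ===== LEMMAS AND PROOFS =====

-- generic characterisation of a set-building foldl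
lemma pv_mem_foldl_iff {α β : Type} (f : List β → α → List β) (Q : α → β → Prop)
    (hf : ∀ s x p, p ∈ f s x ↔ p ∈ s ∨ Q x p) (l : List α) (s : List β) (p : β) :
    p ∈ l.foldl f s ↔ p ∈ s ∨ ∃ x ∈ l, Q x p := by
  induction l generalizing s with
  | nil => simp
  | cons y t ih =>
    simp only [List.foldl_cons, ih, hf, List.mem_cons]
    constructor
    · rintro ((h | h) | ⟨x, hx, hQ⟩)
      · exact Or.inl h
      · exact Or.inr ⟨y, Or.inl rfl, h⟩
      · exact Or.inr ⟨x, Or.inr hx, hQ⟩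
    · rintro (h | ⟨x, rfl | hx, hQ⟩)
      · exact Or.inl (Or.inl h)
      · exact Or.inl (Or.inr hQ)
      · exact Or.inr ⟨x, hx, hQ⟩

lemma pv_nodup_foldl {α β : Type} (f : List β → α → List β)
    (hf : ∀ s x, s.Nodup → (f s x).Nodup) (l : List α) (s : List β)
    (hs : s.Nodup) : (l.foldl f s).Nodup := by
  induction l generalizing s with
  | nil => exact hs
  | cons y t ih => exact ih _ (hf _ _ hs)

lemma pvSortPair_eq (a b : String) : pvSortPair a b = if b < a then (b, a) else (a, b) := by
  unfold pvSortPair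
  have hlt : (b.toList < a.toList) = (b < a) := by
    simp [String.lt_iff_toList_lt]
  by_cases h : b < a <;> simp [PySem.List.sorted, PySem.List.insertBy, hlt, h]

lemma pvSortPair_comm (a b : String) : pvSortPair a b = pvSortPair b a := by
  rw [pvSortPair_eq, pvSortPair_eq]
  rcases lt_trichotomy a b with h | h | h
  · simp [h, not_lt.mpr h.le]
  · simp [h]
  · simp [h, not_lt.mpr h.le]

-- sorted(list_of_tuples) = stable sort under the lexicographic key
lemma pv_sorted2_eq_sorted_lex (xs : List (String × String)) :
    PySem.List.sorted2 xs Prod.fst Prod.snd false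
      = PySem.List.sorted xs (fun p => toLex p) false := by
  rw [PySem.List.sorted_eq_foldl_insertBy]
  show List.foldl _ [] xs = _
  have hcmp : (fun a b : String × String =>
      (decide (a.1 < b.1) || (!decide (b.1 < a.1) && decide (a.2 < b.2))))
      = (fun a b : String × String => decide (toLex a < toLex b)) := by
    funext a b
    have hlex : (toLex a < toLex b) ↔ (a.1 < b.1 ∨ (a.1 = b.1 ∧ a.2 < b.2)) := Prod.Lex.lt_iff
    rcases lt_trichotomy a.1 b.1 with h | h | h
    · simp [hlex, h]
    · simp [hlex, h]
    · simp [hlex, h, not_lt.mpr h.le, h.ne']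
  simp only [hcmp, Bool.false_eq_true, if_false]

-- arithmetic of blocks
lemma pv_encode_decomp (rs i j : Int) (hrs : 0 < rs) (_hi : 0 ≤ i) (hj : 0 ≤ j) (hjr : j < rs) :
    PySem.Int.floordiv (i * rs + j) rs = i ∧ PySem.Int.mod (i * rs + j) rs = j := by
  have hfd : PySem.Int.floordiv (i * rs + j) rs = i := by
    rw [PySem.Int.floordiv_eq_iff_of_pos hrs]
    constructor
    · linarith
    · nlinarith
  refine ⟨hfd, ?_⟩
  have h := PySem.Int.floordiv_mul_add_mod (i * rs + j) rs
  rw [hfd] at h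
  linarith

lemma pv_k_decomp (rs k : Int) (hrs : 0 < rs) (hk : 0 ≤ k) (hkn : k < rs * rs) :
    (0 ≤ PySem.Int.floordiv k rs ∧ PySem.Int.floordiv k rs < rs) ∧
    (0 ≤ PySem.Int.mod k rs ∧ PySem.Int.mod k rs < rs) ∧
    PySem.Int.floordiv k rs * rs + PySem.Int.mod k rs = k := by
  have hsum := PySem.Int.floordiv_mul_add_mod k rs
  have hm0 := PySem.Int.mod_nonneg k hrs
  have hm1 := PySem.Int.mod_lt k hrs
  have hq0 : 0 ≤ PySem.Int.floordiv k rs := by nlinarith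
  have hq1 : PySem.Int.floordiv k rs < rs := by nlinarith
  exact ⟨⟨hq0, hq1⟩, ⟨hm0, hm1⟩, hsum⟩

lemma pv_block_decomp (rs x y : Int) (hrs : 0 < rs) (hx : 0 ≤ x) (hxn : x < rs * rs) :
    (∃ i, (0 ≤ i ∧ i < rs) ∧ y = PySem.Int.floordiv x rs * rs + i) ↔
      ((0 ≤ y ∧ y < rs * rs) ∧ PySem.Int.floordiv y rs = PySem.Int.floordiv x rs) := by
  obtain ⟨⟨hq0, hq1⟩, _, _⟩ := pv_k_decomp rs x hrs hx hxn
  constructor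
  · rintro ⟨i, ⟨hi0, hi1⟩, rfl⟩
    refine ⟨⟨by nlinarith, by nlinarith⟩, ?_⟩
    rw [PySem.Int.floordiv_eq_iff_of_pos hrs]
    constructor
    · linarith
    · nlinarith
  · rintro ⟨⟨hy0, hy1⟩, hfd⟩
    refine ⟨y - PySem.Int.floordiv x rs * rs, ⟨?_, ?_⟩, by ring⟩
    · have := (PySem.Int.floordiv_eq_iff_of_pos hrs (a := y)).mp hfd
      linarith [this.1]
    · have := (PySem.Int.floordiv_eq_iff_of_pos hrs (a := y)).mp hfd
      nlinarith [this.2]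

-- the common characterisation of the constraint set
def pvRowC (n : Int) (p : String × String) : Prop :=
  ∃ r c1 c2 : Int, (0 ≤ r ∧ r < n) ∧ (0 ≤ c1 ∧ c1 < n) ∧ (0 ≤ c2 ∧ c2 < n) ∧ c1 ≠ c2 ∧
    p = pvSortPair (pvCell r c1) (pvCell r c2)

def pvColC (n : Int) (p : String × String) : Prop :=
  ∃ c r1 r2 : Int, (0 ≤ c ∧ c < n) ∧ (0 ≤ r1 ∧ r1 < n) ∧ (0 ≤ r2 ∧ r2 < n) ∧ r1 ≠ r2 ∧
    p = pvSortPair (pvCell r1 c) (pvCell r2 c)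

def pvRegC (rs : Int) (p : String × String) : Prop :=
  ∃ r1 c1 r2 c2 : Int, (0 ≤ r1 ∧ r1 < rs * rs) ∧ (0 ≤ c1 ∧ c1 < rs * rs) ∧
    (0 ≤ r2 ∧ r2 < rs * rs) ∧ (0 ≤ c2 ∧ c2 < rs * rs) ∧
    PySem.Int.floordiv r1 rs = PySem.Int.floordiv r2 rs ∧
    PySem.Int.floordiv c1 rs = PySem.Int.floordiv c2 rs ∧
    ¬(r1 = r2 ∧ c1 = c2) ∧ p = pvSortPair (pvCell r1 c1) (pvCell r2 c2)

-- what one iteration of A's cell body contributes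
def pvQA (n rs : Int) (proper : Bool) (row col : Int) (p : String × String) : Prop :=
  (∃ c, ((0 ≤ c ∧ c < col) ∨ (col + 1 ≤ c ∧ c < n)) ∧
      p = pvSortPair (pvCell row col) (pvCell row c)) ∨
  (∃ r, ((0 ≤ r ∧ r < row) ∨ (row + 1 ≤ r ∧ r < n)) ∧
      p = pvSortPair (pvCell row col) (pvCell r col)) ∨
  (proper = true ∧ ∃ i, (0 ≤ i ∧ i < rs) ∧ ∃ j, (0 ≤ j ∧ j < rs) ∧
      (PySem.Int.floordiv row rs * rs + i ≠ row ∨ PySem.Int.floordiv col rs * rs + j ≠ col) ∧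
      p = pvSortPair (pvCell row col)
            (pvCell (PySem.Int.floordiv row rs * rs + i) (PySem.Int.floordiv col rs * rs + j)))

lemma pv_mem_ACell (n rs : Int) (proper : Bool) (row col : Int)
    (s : PySem.Set (String × String)) (p : String × String) :
    p ∈ pvACell n rs proper row s col ↔ p ∈ s ∨ pvQA n rs proper row col p := by
  have hadd : ∀ (e : String × String) (s : PySem.Set (String × String)) (q : String × String),
      q ∈ s.add e ↔ q ∈ s ∨ q = e := fun e s q => PySem.Set.mem_add s e q
  have hcols := pv_mem_foldl_iff
    (fun s c => PySem.Set.add s (pvSortPair (pvCell row col) (pvCell row c)))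
    (fun c q => q = pvSortPair (pvCell row col) (pvCell row c))
    (fun s c q => hadd _ s q)
    (PySem.List.pyRange 0 col ++ PySem.List.pyRange (col + 1) n)
  have hrows := pv_mem_foldl_iff
    (fun s r => PySem.Set.add s (pvSortPair (pvCell row col) (pvCell r col)))
    (fun r q => q = pvSortPair (pvCell row col) (pvCell r col))
    (fun s r q => hadd _ s q)
    (PySem.List.pyRange 0 row ++ PySem.List.pyRange (row + 1) n)
  have hregin : ∀ (i : Int) (s : PySem.Set (String × String)) (q : String × String),
      q ∈ (PySem.List.pyRange 0 rs).foldl (fun s j =>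
        if PySem.Int.floordiv row rs * rs + i ≠ row ∨ PySem.Int.floordiv col rs * rs + j ≠ col then
          PySem.Set.add s (pvSortPair (pvCell row col)
            (pvCell (PySem.Int.floordiv row rs * rs + i) (PySem.Int.floordiv col rs * rs + j)))
        else s) s ↔ q ∈ s ∨ ∃ j ∈ PySem.List.pyRange 0 rs,
          ((PySem.Int.floordiv row rs * rs + i ≠ row ∨ PySem.Int.floordiv col rs * rs + j ≠ col) ∧
           q = pvSortPair (pvCell row col)
            (pvCell (PySem.Int.floordiv row rs * rs + i) (PySem.Int.floordiv col rs * rs + j))) := by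
    intro i s q
    refine pv_mem_foldl_iff _
      (fun j q =>
        (PySem.Int.floordiv row rs * rs + i ≠ row ∨ PySem.Int.floordiv col rs * rs + j ≠ col) ∧
           q = pvSortPair (pvCell row col)
            (pvCell (PySem.Int.floordiv row rs * rs + i) (PySem.Int.floordiv col rs * rs + j)))
      ?_ (PySem.List.pyRange 0 rs) s q
    intro s j q
    dsimp only
    split_ifs with h
    · rw [hadd]; tauto
    · tauto
  have hreg := pv_mem_foldl_iff
    (fun (s : PySem.Set (String × String)) (i : Int) =>
      (PySem.List.pyRange 0 rs).foldl (fun s j =>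
        if PySem.Int.floordiv row rs * rs + i ≠ row ∨ PySem.Int.floordiv col rs * rs + j ≠ col then
          PySem.Set.add s (pvSortPair (pvCell row col)
            (pvCell (PySem.Int.floordiv row rs * rs + i) (PySem.Int.floordiv col rs * rs + j)))
        else s) s)
    (fun i q => ∃ j ∈ PySem.List.pyRange 0 rs,
      ((PySem.Int.floordiv row rs * rs + i ≠ row ∨ PySem.Int.floordiv col rs * rs + j ≠ col) ∧
       q = pvSortPair (pvCell row col)
        (pvCell (PySem.Int.floordiv row rs * rs + i) (PySem.Int.floordiv col rs * rs + j))))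
    (fun s i q => hregin i s q) (PySem.List.pyRange 0 rs)
  unfold pvACell pvQA
  by_cases hp : proper = true
  · rw [if_pos hp, hreg, hrows, hcols]
    simp only [List.mem_append, PySem.List.mem_pyRange_one, hp, true_and, or_assoc]
  · rw [if_neg hp, hrows, hcols]
    simp only [List.mem_append, PySem.List.mem_pyRange_one, hp, Bool.false_eq_true, false_and, or_false, or_assoc]

-- proof-side names for the two constraint sets
def pvASet (n rs : Int) (proper : Bool) : PySem.Set (String × String) :=
  (PySem.List.pyRange 0 n).foldl (pvARow n rs proper) PySem.Set.empty

def pvBSet (n rs : Int) (proper : Bool) : PySem.Set (String × String) :=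
  let c1 := (PySem.List.pyRange 0 n).foldl (fun s r =>
    pvAddGroup s ((PySem.List.pyRange 0 n).map (fun c => pvCell r c))) PySem.Set.empty
  let c2 := (PySem.List.pyRange 0 n).foldl (fun s c =>
    pvAddGroup s ((PySem.List.pyRange 0 n).map (fun r => pvCell r c))) c1
  if proper then
    (PySem.List.pyRange 0 rs).foldl (fun s br =>
      (PySem.List.pyRange 0 rs).foldl (fun s bc =>
        pvAddGroup s ((PySem.List.pyRange 0 (rs * rs)).map (fun k =>
          pvCell (br * rs + PySem.Int.floordiv k rs)
                 (bc * rs + PySem.Int.mod k rs)))) s) c2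
  else c2

lemma pv_A_char (n rs : Int) (proper : Bool) (_hn : 0 ≤ n) (hrs : 0 ≤ rs)
    (hprop : proper = true → n = rs * rs) (p : String × String) :
    p ∈ pvASet n rs proper ↔
      pvRowC n p ∨ pvColC n p ∨ (proper = true ∧ pvRegC rs p) := by
  unfold pvASet
  have hRow : ∀ (s : PySem.Set (String × String)) (row : Int) (q : String × String),
      q ∈ pvARow n rs proper s row ↔ q ∈ s ∨
        ∃ col, (0 ≤ col ∧ col < n) ∧ pvQA n rs proper row col q := by
    intro s row q
    unfold pvARow
    rw [pv_mem_foldl_iff (pvACell n rs proper row) (pvQA n rs proper row)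
      (fun s col q => pv_mem_ACell n rs proper row col s q) (PySem.List.pyRange 0 n) s q]
    simp only [PySem.List.mem_pyRange_one]
  rw [pv_mem_foldl_iff (pvARow n rs proper)
    (fun row q => ∃ col, (0 ≤ col ∧ col < n) ∧ pvQA n rs proper row col q)
    (fun s row q => hRow s row q) (PySem.List.pyRange 0 n) PySem.Set.empty p]
  simp only [PySem.List.mem_pyRange_one, PySem.Set.empty, List.not_mem_nil, false_or]
  constructor
  · rintro ⟨row, ⟨hr0, hr1⟩, col, ⟨hc0, hc1⟩, hQA⟩
    rcases hQA with ⟨c, hc, rfl⟩ | ⟨r, hr, rfl⟩ | ⟨hp, i, hi, j, hj, hcond, rfl⟩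
    · exact Or.inl ⟨row, col, c, ⟨hr0, hr1⟩, ⟨hc0, hc1⟩, ⟨by omega, by omega⟩, by omega, rfl⟩
    · exact Or.inr (Or.inl ⟨col, row, r, ⟨hc0, hc1⟩, ⟨hr0, hr1⟩, ⟨by omega, by omega⟩, by omega, rfl⟩)
    · refine Or.inr (Or.inr ⟨hp, ?_⟩)
      have hn' := hprop hp
      have hrspos : 0 < rs := by nlinarith
      rw [hn'] at hr1 hc1
      obtain ⟨⟨h20, h21⟩, hfdr⟩ := (pv_block_decomp rs row _ hrspos hr0 hr1).mp ⟨i, hi, rfl⟩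
      obtain ⟨⟨h30, h31⟩, hfdc⟩ := (pv_block_decomp rs col _ hrspos hc0 hc1).mp ⟨j, hj, rfl⟩
      exact ⟨row, col, _, _, ⟨hr0, hr1⟩, ⟨hc0, hc1⟩, ⟨h20, h21⟩, ⟨h30, h31⟩,
        hfdr.symm, hfdc.symm, by omega, rfl⟩
  · rintro (⟨r, c1, c2, hr, hc1, hc2, hne, rfl⟩ | ⟨c, r1, r2, hc, hr1, hr2, hne, rfl⟩ |
      ⟨hp, r1, c1, r2, c2, hr1, hc1, hr2, hc2, hfdr, hfdc, hne, rfl⟩)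
    · exact ⟨r, hr, c1, hc1, Or.inl ⟨c2, by omega, rfl⟩⟩
    · exact ⟨r1, hr1, c, hc, Or.inr (Or.inl ⟨r2, by omega, rfl⟩)⟩
    · have hn' := hprop hp
      have hrspos : 0 < rs := by nlinarith [hr1.1, hr1.2]
      obtain ⟨i, hi, hr2eq⟩ := (pv_block_decomp rs r1 r2 hrspos hr1.1 hr1.2).mpr ⟨hr2, hfdr.symm⟩
      obtain ⟨j, hj, hc2eq⟩ := (pv_block_decomp rs c1 c2 hrspos hc1.1 hc1.2).mpr ⟨hc2, hfdc.symm⟩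
      refine ⟨r1, ⟨hr1.1, by omega⟩, c1, ⟨hc1.1, by omega⟩,
        Or.inr (Or.inr ⟨hp, i, hi, j, hj, by omega, by rw [← hr2eq, ← hc2eq]⟩)⟩

lemma pv_mem_addGroup (s : PySem.Set (String × String)) (cells : List String) (p : String × String) :
    p ∈ pvAddGroup s cells ↔ p ∈ s ∨ ∃ a b : Int, 0 ≤ a ∧ a < b ∧ b < (cells.length : Int) ∧
      p = pvSortPair (PySem.List.pyGetD cells a "") (PySem.List.pyGetD cells b "") := by
  unfold pvAddGroup
  have hin : ∀ (a : Int) (s : PySem.Set (String × String)) (q : String × String),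
      q ∈ (PySem.List.pyRange (a + 1) (cells.length : Int)).foldl (fun s b =>
        PySem.Set.add s (pvSortPair (PySem.List.pyGetD cells a "") (PySem.List.pyGetD cells b ""))) s
      ↔ q ∈ s ∨ ∃ b ∈ PySem.List.pyRange (a + 1) (cells.length : Int),
          q = pvSortPair (PySem.List.pyGetD cells a "") (PySem.List.pyGetD cells b "") := by
    intro a s q
    exact pv_mem_foldl_iff _
      (fun b q => q = pvSortPair (PySem.List.pyGetD cells a "") (PySem.List.pyGetD cells b ""))
      (fun s b q => PySem.Set.mem_add s _ q) _ s q
  rw [pv_mem_foldl_iff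
    (fun (s : PySem.Set (String × String)) (a : Int) =>
      (PySem.List.pyRange (a + 1) (cells.length : Int)).foldl (fun s b =>
        PySem.Set.add s (pvSortPair (PySem.List.pyGetD cells a "") (PySem.List.pyGetD cells b ""))) s)
    (fun a q => ∃ b ∈ PySem.List.pyRange (a + 1) (cells.length : Int),
      q = pvSortPair (PySem.List.pyGetD cells a "") (PySem.List.pyGetD cells b ""))
    (fun s a q => hin a s q) (PySem.List.pyRange 0 (cells.length : Int)) s p]
  simp only [PySem.List.mem_pyRange_one]
  constructor
  · rintro (h | ⟨a, ⟨ha0, _⟩, b, ⟨hb0, hb1⟩, rfl⟩)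
    · exact Or.inl h
    · exact Or.inr ⟨a, b, ha0, by omega, hb1, rfl⟩
  · rintro (h | ⟨a, b, ha0, hab, hb1, rfl⟩)
    · exact Or.inl h
    · exact Or.inr ⟨a, ⟨ha0, by omega⟩, b, ⟨by omega, hb1⟩, rfl⟩

lemma pv_mem_addGroup_map (f : Int → String) (m : Int) (hm : 0 ≤ m)
    (s : PySem.Set (String × String)) (p : String × String) :
    p ∈ pvAddGroup s ((PySem.List.pyRange 0 m).map f) ↔ p ∈ s ∨
      ∃ a b : Int, 0 ≤ a ∧ a < b ∧ b < m ∧ p = pvSortPair (f a) (f b) := by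
  rw [pv_mem_addGroup]
  have hlen : ((((PySem.List.pyRange 0 m).map f).length : Nat) : Int) = m := by
    simp [PySem.List.length_pyRange_one, Int.toNat_of_nonneg hm]
  rw [hlen]
  constructor
  · rintro (h | ⟨a, b, ha0, hab, hb1, rfl⟩)
    · exact Or.inl h
    · refine Or.inr ⟨a, b, ha0, hab, hb1, ?_⟩
      rw [PySem.List.pyGetD_map_pyRange_of_nonneg f m a "" ha0 (by omega),
          PySem.List.pyGetD_map_pyRange_of_nonneg f m b "" (by omega) hb1]
  · rintro (h | ⟨a, b, ha0, hab, hb1, rfl⟩)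
    · exact Or.inl h
    · refine Or.inr ⟨a, b, ha0, hab, hb1, ?_⟩
      rw [PySem.List.pyGetD_map_pyRange_of_nonneg f m a "" ha0 (by omega),
          PySem.List.pyGetD_map_pyRange_of_nonneg f m b "" (by omega) hb1]

lemma pv_rowB_iff (n : Int) (p : String × String) :
    (∃ r, (0 ≤ r ∧ r < n) ∧ ∃ a b : Int, 0 ≤ a ∧ a < b ∧ b < n ∧
      p = pvSortPair (pvCell r a) (pvCell r b)) ↔ pvRowC n p := by
  constructor
  · rintro ⟨r, hr, a, b, ha0, hab, hb1, rfl⟩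
    exact ⟨r, a, b, hr, ⟨ha0, by omega⟩, ⟨by omega, hb1⟩, by omega, rfl⟩
  · rintro ⟨r, c1, c2, hr, hc1, hc2, hne, rfl⟩
    rcases lt_or_gt_of_ne hne with h | h
    · exact ⟨r, hr, c1, c2, hc1.1, h, hc2.2, rfl⟩
    · exact ⟨r, hr, c2, c1, hc2.1, h, hc1.2, pvSortPair_comm _ _⟩

lemma pv_colB_iff (n : Int) (p : String × String) :
    (∃ c, (0 ≤ c ∧ c < n) ∧ ∃ a b : Int, 0 ≤ a ∧ a < b ∧ b < n ∧
      p = pvSortPair (pvCell a c) (pvCell b c)) ↔ pvColC n p := by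
  constructor
  · rintro ⟨c, hc, a, b, ha0, hab, hb1, rfl⟩
    exact ⟨c, a, b, hc, ⟨ha0, by omega⟩, ⟨by omega, hb1⟩, by omega, rfl⟩
  · rintro ⟨c, r1, r2, hc, hr1, hr2, hne, rfl⟩
    rcases lt_or_gt_of_ne hne with h | h
    · exact ⟨c, hc, r1, r2, hr1.1, h, hr2.2, rfl⟩
    · exact ⟨c, hc, r2, r1, hr2.1, h, hr1.2, pvSortPair_comm _ _⟩

lemma pv_regB_iff (rs : Int) (hrs : 0 ≤ rs) (p : String × String) :
    (∃ br, (0 ≤ br ∧ br < rs) ∧ ∃ bc, (0 ≤ bc ∧ bc < rs) ∧ ∃ a b : Int,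
      0 ≤ a ∧ a < b ∧ b < rs * rs ∧
      p = pvSortPair
        (pvCell (br * rs + PySem.Int.floordiv a rs) (bc * rs + PySem.Int.mod a rs))
        (pvCell (br * rs + PySem.Int.floordiv b rs) (bc * rs + PySem.Int.mod b rs))) ↔
      pvRegC rs p := by
  constructor
  · rintro ⟨br, ⟨hbr0, hbr1⟩, bc, ⟨hbc0, hbc1⟩, a, b, ha0, hab, hb1, rfl⟩
    have hrspos : 0 < rs := by omega
    obtain ⟨⟨hia0, hia1⟩, ⟨hja0, hja1⟩, hsa⟩ := pv_k_decomp rs a hrspos ha0 (by omega)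
    obtain ⟨⟨hib0, hib1⟩, ⟨hjb0, hjb1⟩, hsb⟩ := pv_k_decomp rs b hrspos (by omega) hb1
    have h01 : 0 ≤ br * rs := mul_nonneg hbr0 hrs
    have h02 : 0 ≤ bc * rs := mul_nonneg hbc0 hrs
    have h03 : br * rs + rs ≤ rs * rs := by
      have h := mul_le_mul_of_nonneg_right (show br + 1 ≤ rs by omega) hrs
      linarith [show (br + 1) * rs = br * rs + rs from by ring]
    have h04 : bc * rs + rs ≤ rs * rs := by
      have h := mul_le_mul_of_nonneg_right (show bc + 1 ≤ rs by omega) hrs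
      linarith [show (bc + 1) * rs = bc * rs + rs from by ring]
    refine ⟨br * rs + PySem.Int.floordiv a rs, bc * rs + PySem.Int.mod a rs,
            br * rs + PySem.Int.floordiv b rs, bc * rs + PySem.Int.mod b rs,
      ⟨by linarith, by linarith⟩, ⟨by linarith, by linarith⟩,
      ⟨by linarith, by linarith⟩, ⟨by linarith, by linarith⟩, ?_, ?_, ?_, rfl⟩
    · rw [(pv_encode_decomp rs br (PySem.Int.floordiv a rs) hrspos hbr0 hia0 hia1).1,
          (pv_encode_decomp rs br (PySem.Int.floordiv b rs) hrspos hbr0 hib0 hib1).1]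
    · rw [(pv_encode_decomp rs bc (PySem.Int.mod a rs) hrspos hbc0 hja0 hja1).1,
          (pv_encode_decomp rs bc (PySem.Int.mod b rs) hrspos hbc0 hjb0 hjb1).1]
    · rintro ⟨h1, h2⟩
      have e1 : PySem.Int.floordiv a rs = PySem.Int.floordiv b rs := by linarith
      have e2 : PySem.Int.mod a rs = PySem.Int.mod b rs := by linarith
      have : a = b := by rw [← hsa, ← hsb, e1, e2]
      omega
  · rintro ⟨r1, c1, r2, c2, hr1, hc1, hr2, hc2, hfdr, hfdc, hne, rfl⟩
    have hrspos : 0 < rs := by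
      rcases eq_or_lt_of_le hrs with h | h
      · exfalso
        have hz : rs * rs = 0 := by rw [← h]; ring
        linarith [hr1.1, hr1.2]
      · exact h
    obtain ⟨⟨hbr0, hbr1⟩, _, _⟩ := pv_k_decomp rs r1 hrspos hr1.1 hr1.2
    obtain ⟨⟨hbc0, hbc1⟩, _, _⟩ := pv_k_decomp rs c1 hrspos hc1.1 hc1.2
    have hbl1 := (PySem.Int.floordiv_eq_iff_of_pos hrspos
      (a := r1) (q := PySem.Int.floordiv r1 rs)).mp rfl
    have hbl2 := (PySem.Int.floordiv_eq_iff_of_pos hrspos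
      (a := r2) (q := PySem.Int.floordiv r1 rs)).mp hfdr.symm
    have hbl3 := (PySem.Int.floordiv_eq_iff_of_pos hrspos
      (a := c1) (q := PySem.Int.floordiv c1 rs)).mp rfl
    have hbl4 := (PySem.Int.floordiv_eq_iff_of_pos hrspos
      (a := c2) (q := PySem.Int.floordiv c1 rs)).mp hfdc.symm
    set br := PySem.Int.floordiv r1 rs with hbrdef
    set bc := PySem.Int.floordiv c1 rs with hbcdef
    set i1 := r1 - br * rs with hi1
    set i2 := r2 - br * rs with hi2
    set j1 := c1 - bc * rs with hj1
    set j2 := c2 - bc * rs with hj2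
    have hbre : (br + 1) * rs = br * rs + rs := by ring
    have hbce : (bc + 1) * rs = bc * rs + rs := by ring
    have hi1b : 0 ≤ i1 ∧ i1 < rs :=
      ⟨by linarith [hbl1.1], by linarith [hbl1.2]⟩
    have hi2b : 0 ≤ i2 ∧ i2 < rs :=
      ⟨by linarith [hbl2.1], by linarith [hbl2.2]⟩
    have hj1b : 0 ≤ j1 ∧ j1 < rs :=
      ⟨by linarith [hbl3.1], by linarith [hbl3.2]⟩
    have hj2b : 0 ≤ j2 ∧ j2 < rs :=
      ⟨by linarith [hbl4.1], by linarith [hbl4.2]⟩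
    have henc1 := pv_encode_decomp rs i1 j1 hrspos hi1b.1 hj1b.1 hj1b.2
    have henc2 := pv_encode_decomp rs i2 j2 hrspos hi2b.1 hj2b.1 hj2b.2
    have hb1 : i1 * rs + j1 < rs * rs := by
      have h := mul_le_mul_of_nonneg_right (show i1 + 1 ≤ rs by omega) (le_of_lt hrspos)
      linarith [show (i1 + 1) * rs = i1 * rs + rs from by ring, hj1b.2]
    have hb2 : i2 * rs + j2 < rs * rs := by
      have h := mul_le_mul_of_nonneg_right (show i2 + 1 ≤ rs by omega) (le_of_lt hrspos)
      linarith [show (i2 + 1) * rs = i2 * rs + rs from by ring, hj2b.2]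
    have hcell1 : pvCell (br * rs + PySem.Int.floordiv (i1 * rs + j1) rs)
        (bc * rs + PySem.Int.mod (i1 * rs + j1) rs) = pvCell r1 c1 := by
      rw [henc1.1, henc1.2]; congr 1 <;> omega
    have hcell2 : pvCell (br * rs + PySem.Int.floordiv (i2 * rs + j2) rs)
        (bc * rs + PySem.Int.mod (i2 * rs + j2) rs) = pvCell r2 c2 := by
      rw [henc2.1, henc2.2]; congr 1 <;> omega
    have hneq : i1 * rs + j1 ≠ i2 * rs + j2 := by
      intro h
      have e1 : i1 = i2 := by
        have := henc1.1; rw [h, henc2.1] at this; omega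
      have e2 : j1 = j2 := by
        have := henc1.2; rw [h, henc2.2] at this; omega
      exact hne ⟨by omega, by omega⟩
    rcases lt_or_gt_of_ne hneq with h | h
    · exact ⟨br, ⟨hbr0, hbr1⟩, bc, ⟨hbc0, hbc1⟩, i1 * rs + j1, i2 * rs + j2,
        by linarith [mul_nonneg hi1b.1 (le_of_lt hrspos), hj1b.1], h, hb2,
        by rw [hcell1, hcell2]⟩
    · exact ⟨br, ⟨hbr0, hbr1⟩, bc, ⟨hbc0, hbc1⟩, i2 * rs + j2, i1 * rs + j1,
        by linarith [mul_nonneg hi2b.1 (le_of_lt hrspos), hj2b.1], h, hb1,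
        by rw [hcell1, hcell2, pvSortPair_comm]⟩

lemma pv_B_char (n rs : Int) (proper : Bool) (hn : 0 ≤ n) (hrs : 0 ≤ rs)
    (p : String × String) :
    p ∈ pvBSet n rs proper ↔
      pvRowC n p ∨ pvColC n p ∨ (proper = true ∧ pvRegC rs p) := by
  unfold pvBSet
  have h1 := pv_mem_foldl_iff
    (fun s r => pvAddGroup s ((PySem.List.pyRange 0 n).map (fun c => pvCell r c)))
    (fun r q => ∃ a b : Int, 0 ≤ a ∧ a < b ∧ b < n ∧ q = pvSortPair (pvCell r a) (pvCell r b))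
    (fun s r q => pv_mem_addGroup_map (fun c => pvCell r c) n hn s q)
    (PySem.List.pyRange 0 n)
  have h2 := pv_mem_foldl_iff
    (fun s c => pvAddGroup s ((PySem.List.pyRange 0 n).map (fun r => pvCell r c)))
    (fun c q => ∃ a b : Int, 0 ≤ a ∧ a < b ∧ b < n ∧ q = pvSortPair (pvCell a c) (pvCell b c))
    (fun s c q => pv_mem_addGroup_map (fun r => pvCell r c) n hn s q)
    (PySem.List.pyRange 0 n)
  have hregin : ∀ (br : Int) (s : PySem.Set (String × String)) (q : String × String),
      q ∈ (PySem.List.pyRange 0 rs).foldl (fun s bc =>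
        pvAddGroup s ((PySem.List.pyRange 0 (rs * rs)).map (fun k =>
          pvCell (br * rs + PySem.Int.floordiv k rs)
                 (bc * rs + PySem.Int.mod k rs)))) s ↔
      q ∈ s ∨ ∃ bc ∈ PySem.List.pyRange 0 rs, ∃ a b : Int, 0 ≤ a ∧ a < b ∧ b < rs * rs ∧
        q = pvSortPair
          (pvCell (br * rs + PySem.Int.floordiv a rs) (bc * rs + PySem.Int.mod a rs))
          (pvCell (br * rs + PySem.Int.floordiv b rs) (bc * rs + PySem.Int.mod b rs)) := by
    intro br s q
    exact pv_mem_foldl_iff _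
      (fun bc q => ∃ a b : Int, 0 ≤ a ∧ a < b ∧ b < rs * rs ∧
        q = pvSortPair
          (pvCell (br * rs + PySem.Int.floordiv a rs) (bc * rs + PySem.Int.mod a rs))
          (pvCell (br * rs + PySem.Int.floordiv b rs) (bc * rs + PySem.Int.mod b rs)))
      (fun s bc q => pv_mem_addGroup_map
        (fun k => pvCell (br * rs + PySem.Int.floordiv k rs) (bc * rs + PySem.Int.mod k rs))
        (rs * rs) (mul_nonneg hrs hrs) s q)
      (PySem.List.pyRange 0 rs) s q
  have hreg := pv_mem_foldl_iff
    (fun (s : PySem.Set (String × String)) (br : Int) =>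
      (PySem.List.pyRange 0 rs).foldl (fun s bc =>
        pvAddGroup s ((PySem.List.pyRange 0 (rs * rs)).map (fun k =>
          pvCell (br * rs + PySem.Int.floordiv k rs)
                 (bc * rs + PySem.Int.mod k rs)))) s)
    (fun br q => ∃ bc ∈ PySem.List.pyRange 0 rs, ∃ a b : Int, 0 ≤ a ∧ a < b ∧ b < rs * rs ∧
        q = pvSortPair
          (pvCell (br * rs + PySem.Int.floordiv a rs) (bc * rs + PySem.Int.mod a rs))
          (pvCell (br * rs + PySem.Int.floordiv b rs) (bc * rs + PySem.Int.mod b rs)))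
    (fun s br q => hregin br s q) (PySem.List.pyRange 0 rs)
  by_cases hp : proper = true
  · rw [if_pos hp, hreg, h2, h1]
    simp only [PySem.Set.empty, List.not_mem_nil, false_or, PySem.List.mem_pyRange_one,
      hp, true_and, or_assoc]
    exact or_congr (pv_rowB_iff n p) (or_congr (pv_colB_iff n p) (pv_regB_iff rs hrs p))
  · rw [if_neg hp, h2, h1]
    simp only [PySem.Set.empty, List.not_mem_nil, false_or, PySem.List.mem_pyRange_one,
      hp, Bool.false_eq_true, false_and, or_false]
    exact or_congr (pv_rowB_iff n p) (pv_colB_iff n p)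

lemma pv_A_nodup (n rs : Int) (proper : Bool) : (pvASet n rs proper).Nodup := by
  unfold pvASet
  refine pv_nodup_foldl _ ?_ _ _ List.nodup_nil
  intro s row hs
  unfold pvARow
  refine pv_nodup_foldl _ ?_ _ _ hs
  intro s col hs
  unfold pvACell
  have hadd : ∀ (s : PySem.Set (String × String)) (e : String × String),
      s.Nodup → (PySem.Set.add s e).Nodup := fun s e h => PySem.Set.nodup_add s e h
  have hbase : ∀ (s : PySem.Set (String × String)), s.Nodup →
      ((PySem.List.pyRange 0 row ++ PySem.List.pyRange (row + 1) n).foldl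
        (fun s r => PySem.Set.add s (pvSortPair (pvCell row col) (pvCell r col)))
        ((PySem.List.pyRange 0 col ++ PySem.List.pyRange (col + 1) n).foldl
          (fun s c => PySem.Set.add s (pvSortPair (pvCell row col) (pvCell row c))) s)).Nodup := by
    intro s hs
    exact pv_nodup_foldl _ (fun s r h => hadd s _ h) _ _
      (pv_nodup_foldl _ (fun s c h => hadd s _ h) _ _ hs)
  split_ifs with hp
  · refine pv_nodup_foldl _ ?_ _ _ (hbase s hs)
    intro s i hsi
    refine pv_nodup_foldl _ ?_ _ _ hsi
    intro s j hsj
    dsimp only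
    split_ifs with h
    · exact hadd s _ hsj
    · exact hsj
  · exact hbase s hs

lemma pv_B_nodup (n rs : Int) (proper : Bool) : (pvBSet n rs proper).Nodup := by
  unfold pvBSet
  have hgrp : ∀ (s : PySem.Set (String × String)) (cells : List String),
      s.Nodup → (pvAddGroup s cells).Nodup := by
    intro s cells hs
    unfold pvAddGroup
    refine pv_nodup_foldl _ ?_ _ _ hs
    intro s a hsa
    refine pv_nodup_foldl _ ?_ _ _ hsa
    intro s b hsb
    exact PySem.Set.nodup_add s _ hsb
  have h1 : ((PySem.List.pyRange 0 n).foldl (fun s c =>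
      pvAddGroup s ((PySem.List.pyRange 0 n).map (fun r => pvCell r c)))
      ((PySem.List.pyRange 0 n).foldl (fun s r =>
        pvAddGroup s ((PySem.List.pyRange 0 n).map (fun c => pvCell r c)))
        PySem.Set.empty)).Nodup := by
    refine pv_nodup_foldl _ (fun s c h => hgrp s _ h) _ _ ?_
    exact pv_nodup_foldl _ (fun s r h => hgrp s _ h) _ _ List.nodup_nil
  split_ifs with hp
  · refine pv_nodup_foldl _ ?_ _ _ h1
    intro s br hsb
    exact pv_nodup_foldl _ (fun s bc h => hgrp s _ h) _ _ hsb
  · exact h1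

-- ===== VERDICT (by name: the statement is the Claim_ definition above) =====
theorem get_inequality_constraints_py_spec : Claim_equal_get_inequality_constraints_py := by
  intro grid _
  unfold Spec_get_inequality_constraints_py
  have hA : get_inequality_constraints_py grid =
      PySem.List.sorted2 (pvASet (grid.length : Int) (pvIsqrt (grid.length : Int))
        (pvIsqrt (grid.length : Int) ^ 2 == (grid.length : Int))) Prod.fst Prod.snd false := rfl
  have hB : get_inequality_constraints_py_alt grid =
      PySem.List.sorted2 (pvBSet (grid.length : Int) (pvIsqrt (grid.length : Int))
        (pvIsqrt (grid.length : Int) ^ 2 == (grid.length : Int))) Prod.fst Prod.snd false := rfl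
  rw [hA, hB, pv_sorted2_eq_sorted_lex, pv_sorted2_eq_sorted_lex]
  apply PySem.List.sorted_eq_sorted_of_perm _ _ _ toLex.injective
  refine (List.perm_ext_iff_of_nodup (pv_A_nodup _ _ _) (pv_B_nodup _ _ _)).mpr ?_
  intro p
  have hn : (0 : Int) ≤ (grid.length : Int) := Int.natCast_nonneg _
  have hrs : (0 : Int) ≤ pvIsqrt (grid.length : Int) := Int.natCast_nonneg _
  have hprop : (pvIsqrt (grid.length : Int) ^ 2 == (grid.length : Int)) = true →
      (grid.length : Int) = pvIsqrt (grid.length : Int) * pvIsqrt (grid.length : Int) := by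
    intro h
    have h2 := beq_iff_eq.mp h
    rw [pow_two] at h2
    exact h2.symm
  rw [pv_A_char _ _ _ hn hrs hprop p, pv_B_char _ _ _ hn hrs p]
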